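-- pv_equiv track=rewrite | github.com/zzzinsCode/stashapp-plugins | plugins/ConcatFiles/ConcatFiles.py | replace_variant_token
-- ===== SOURCE A (Python) =====
-- def replace_variant_token(vals):
--     min_len = min(len(v) for v in vals)
--     p = 0
--     while p < min_len and len(set(v[p] for v in vals)) == 1:
--         p += 1
--     prefix = vals[0][:p]
--     s = 0
--     while s < min_len and len(set(v[-(s+1)] for v in vals)) == 1:
--         s += 1
--     suffix = vals[0][len(vals[0])-s:] if s else ''
--     trimmed_prefix = prefix.rstrip('0123456789')
--     kept_len = len(trimmed_prefix) + len(suffix)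
--     removed  = len(vals[0]) - kept_len
--     x_count  = min(max(removed, 1), 3)
--     return trimmed_prefix + ('X' * x_count) + suffix
-- ===== SOURCE B (Python) =====
-- def _cp(a, b):
--     if a and b and a[0] == b[0]:
--         return a[0] + _cp(a[1:], b[1:])
--     return ''
--
-- def replace_variant_token(vals):
--     first = vals[0]
--     prefix = first
--     rsuffix = first[::-1]
--     for v in vals[1:]:
--         prefix = _cp(prefix, v)
--         rsuffix = _cp(rsuffix, v[::-1])
--     suffix = rsuffix[::-1]
--     trimmed = prefix.rstrip('0123456789')
--     x_count = min(max(len(first) - len(trimmed) - len(suffix), 1), 3)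
--     return trimmed + 'X' * x_count + suffix
-- ===== Notes on version B (the rewrite author's own statement) =====
-- stated objective: alternative
-- what changed: Replaces the two column-wise while-loops (each building a set of the i-th characters of all strings) by a single left-to-right fold that pairwise-reduces the strings with a recursive common-prefix helper (applied to the strings for the prefix and to their reversals for the suffix); post-processing is unchanged.
-- outside the precondition, e.g. on replace_variant_token([]): A raises ValueError, B raises IndexError
import Mathlib
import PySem

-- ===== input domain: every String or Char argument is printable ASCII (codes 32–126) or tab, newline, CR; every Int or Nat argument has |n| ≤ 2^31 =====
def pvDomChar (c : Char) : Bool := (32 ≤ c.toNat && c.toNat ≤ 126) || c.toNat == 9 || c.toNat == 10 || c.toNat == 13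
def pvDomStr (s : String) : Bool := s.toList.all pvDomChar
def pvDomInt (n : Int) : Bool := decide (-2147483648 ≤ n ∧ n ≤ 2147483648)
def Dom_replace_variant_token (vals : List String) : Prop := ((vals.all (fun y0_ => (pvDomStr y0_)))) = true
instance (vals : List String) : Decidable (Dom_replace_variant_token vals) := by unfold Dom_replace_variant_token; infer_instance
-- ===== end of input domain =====

-- B replaces A's two column-wise while-loops (set of i-th chars of all strings) by a pairwise
-- fold of a recursive common-prefix helper over the strings and their reversals; same cost,
-- objective: alternative. Pre_ excludes only the empty list, on which A raises ValueError.


-- ===== PORT A =====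
-- '0123456789' of rstrip
def pvDigits : List Char := ['0','1','2','3','4','5','6','7','8','9']
-- s.rstrip('0123456789') ported by hand (PySem has no chars-argument rstrip): exact — drops
-- the maximal run of trailing characters belonging to the argument set.
def pvRstripDigits (cs : List Char) : List Char :=
  (cs.reverse.dropWhile (fun c => c ∈ pvDigits)).reverse

-- len(set(v[i] for v in vals)) == 1   (i may be negative, Python indexing)
def pvAllEqCol (vals : List String) (i : Int) : Bool :=
  (PySem.Set.ofList (vals.map (fun v => PySem.Str.pyGet? v i))).length == 1

-- while p < min_len and len(set(v[p] for v in vals)) == 1: p += 1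
def pvPLoop (vals : List String) (min_len p : Nat) : Nat :=
  if h : p < min_len ∧ pvAllEqCol vals (p : Int) = true then
    pvPLoop vals min_len (p + 1)
  else p
termination_by min_len - p
decreasing_by omega

-- while s < min_len and len(set(v[-(s+1)] for v in vals)) == 1: s += 1
def pvSLoop (vals : List String) (min_len s : Nat) : Nat :=
  if h : s < min_len ∧ pvAllEqCol vals (-((s : Int) + 1)) = true then
    pvSLoop vals min_len (s + 1)
  else s
termination_by min_len - s
decreasing_by omega

def replace_variant_token (vals : List String) : String :=
  match vals with
  | [] => ""   -- Python raises ValueError (min of empty sequence); excluded by Pre_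
  | v0 :: rest =>
    let min_len : Nat := (rest.map (fun v => v.toList.length)).foldl Nat.min v0.toList.length
    let p := pvPLoop (v0 :: rest) min_len 0
    let prefix_ := PySem.List.slice v0.toList none (some (p : Int))
    let s := pvSLoop (v0 :: rest) min_len 0
    let suffix := if s ≠ 0 then
        PySem.List.slice v0.toList (some ((v0.toList.length : Int) - (s : Int))) none
      else []
    let trimmed_prefix := pvRstripDigits prefix_
    let kept_len : Nat := trimmed_prefix.length + suffix.length
    let removed : Int := (v0.toList.length : Int) - (kept_len : Int)
    let x_count : Int := min (max removed 1) 3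
    String.ofList (trimmed_prefix ++ List.replicate x_count.toNat 'X' ++ suffix)

-- ===== PORT B =====
-- _cp(a, b): recursive longest common prefix of two strings
def pvCp : List Char → List Char → List Char
  | a :: as, b :: bs => if a = b then a :: pvCp as bs else []
  | _, _ => []

def replace_variant_token_alt (vals : List String) : String :=
  match vals with
  | [] => ""   -- vals[0] raises IndexError; excluded by Pre_
  | v0 :: rest =>
    let first := v0.toList
    let st := rest.foldl
      (fun (st : List Char × List Char) v => (pvCp st.1 v.toList, pvCp st.2 v.toList.reverse))
      (first, first.reverse)
    let suffix := st.2.reverse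
    let trimmed := pvRstripDigits st.1
    let x : Int := min (max ((first.length : Int) - (trimmed.length : Int) - (suffix.length : Int)) 1) 3
    String.ofList (trimmed ++ List.replicate x.toNat 'X' ++ suffix)

-- ===== PRECONDITION & SPEC =====
-- Pre_ excludes exactly the empty list, on which A raises ValueError (min of an empty sequence).
def Pre_replace_variant_token (vals : List String) : Prop := vals ≠ []
instance (vals : List String) : Decidable (Pre_replace_variant_token vals) := by
  unfold Pre_replace_variant_token; infer_instance
def pvWitness_replace_variant_token : List String := ["img_01a", "img_02a"]

def Spec_replace_variant_token (vals : List String) (out : String) : Prop :=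
  out = replace_variant_token_alt vals
instance (vals : List String) (out : String) : Decidable (Spec_replace_variant_token vals out) := by
  unfold Spec_replace_variant_token; infer_instance

-- ===== CLAIM (what is proved, stated in full; the proofs are below) =====
def Claim_equal_replace_variant_token : Prop :=
  ∀ (vals : List String), Dom_replace_variant_token vals →
    Pre_replace_variant_token vals →
    Spec_replace_variant_token vals (replace_variant_token vals)

-- ===== LEMMAS AND PROOFS =====

-- pvCp basic facts
lemma pvCp_prefix_left : ∀ (a b : List Char), pvCp a b <+: a := by
  intro a
  induction a with
  | nil => intro b; cases b <;> simp [pvCp]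
  | cons x xs ih =>
    intro b
    cases b with
    | nil => simp [pvCp]
    | cons y ys =>
      by_cases h : x = y <;> simp [pvCp, h]
      exact ih ys

lemma pvCp_prefix_right : ∀ (a b : List Char), pvCp a b <+: b := by
  intro a
  induction a with
  | nil => intro b; cases b <;> simp [pvCp]
  | cons x xs ih =>
    intro b
    cases b with
    | nil => simp [pvCp]
    | cons y ys =>
      by_cases h : x = y <;> simp [pvCp, h]
      subst h; exact ih ys

lemma pvCp_max : ∀ (a b : List Char),
    (pvCp a b).length < a.length → (pvCp a b).length < b.length →
    a[(pvCp a b).length]? ≠ b[(pvCp a b).length]? := by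
  intro a
  induction a with
  | nil => intro b h1 _; simp [pvCp] at h1
  | cons x xs ih =>
    intro b h1 h2
    cases b with
    | nil => simp [pvCp] at h2
    | cons y ys =>
      by_cases h : x = y
      · simp [pvCp, h] at h1 h2 ⊢
        exact ih ys h1 h2
      · simp [pvCp, h]

-- fold of pvCp: common prefix of c0 and all of cs
lemma foldl_pvCp_prefix (cs : List (List Char)) : ∀ (c0 : List Char),
    (cs.foldl pvCp c0 <+: c0) ∧ (∀ c ∈ cs, cs.foldl pvCp c0 <+: c) := by
  induction cs with
  | nil => intro c0; simp
  | cons c cs ih =>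
    intro c0
    have h := ih (pvCp c0 c)
    refine ⟨h.1.trans (pvCp_prefix_left c0 c), ?_⟩
    intro d hd
    rcases List.mem_cons.mp hd with rfl | hd
    · exact h.1.trans (pvCp_prefix_right c0 d)
    · exact h.2 d hd

lemma foldl_pvCp_max (cs : List (List Char)) : ∀ (c0 : List Char),
    (cs.foldl pvCp c0).length < c0.length →
    (∀ d ∈ cs, (cs.foldl pvCp c0).length < d.length ∧
       d[(cs.foldl pvCp c0).length]? = c0[(cs.foldl pvCp c0).length]?) → False := by
  induction cs with
  | nil => intro c0 h1 _; simp at h1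
  | cons e cs ih =>
    intro c0 h1 hall
    simp only [List.foldl_cons] at h1 hall ⊢
    set F := cs.foldl pvCp (pvCp c0 e) with hF
    have hpre : F <+: pvCp c0 e := (foldl_pvCp_prefix cs (pvCp c0 e)).1
    have hlen : F.length ≤ (pvCp c0 e).length := hpre.length_le
    rcases lt_or_eq_of_le hlen with hlt | heq
    · -- strictly inside pvCp c0 e: use IH with base pvCp c0 e
      apply ih (pvCp c0 e) hlt
      intro d hd
      have hd' := hall d (List.mem_cons_of_mem e hd)
      have hbase : (pvCp c0 e)[F.length]? = c0[F.length]? := by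
        rcases pvCp_prefix_left c0 e with ⟨t, ht⟩
        conv_rhs => rw [← ht]
        exact (List.getElem?_append_left hlt).symm
      exact ⟨hd'.1, hd'.2.trans hbase.symm⟩
    · -- F.length = (pvCp c0 e).length: pvCp maximality contradicts agreement of e
      have hc := hall e (List.mem_cons_self)
      have := pvCp_max c0 e (heq ▸ h1) (heq ▸ hc.1)
      rw [← heq] at this
      exact this (hc.2.symm)

-- pair-fold splits into two independent folds
lemma foldl_pair_split (rest : List String) : ∀ (a b : List Char),
    rest.foldl (fun (st : List Char × List Char) v =>
        (pvCp st.1 v.toList, pvCp st.2 v.toList.reverse)) (a, b)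
      = (rest.foldl (fun acc v => pvCp acc v.toList) a,
         rest.foldl (fun acc v => pvCp acc v.toList.reverse) b) := by
  induction rest with
  | nil => intro a b; rfl
  | cons v vs ih => intro a b; simp only [List.foldl_cons]; exact ih _ _

-- min over lengths: foldl Nat.min
lemma foldl_min_le (l : List Nat) : ∀ (a : Nat),
    l.foldl Nat.min a ≤ a ∧ ∀ x ∈ l, l.foldl Nat.min a ≤ x := by
  induction l with
  | nil => intro a; simp
  | cons x xs ih =>
    intro a
    have h := ih (Nat.min a x)
    refine ⟨h.1.trans (Nat.min_le_left _ _), ?_⟩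
    intro y hy
    rcases List.mem_cons.mp hy with rfl | hy
    · exact h.1.trans (Nat.min_le_right _ _)
    · exact h.2 y hy

lemma le_foldl_min (l : List Nat) : ∀ (a b : Nat), b ≤ a → (∀ x ∈ l, b ≤ x) →
    b ≤ l.foldl Nat.min a := by
  induction l with
  | nil => intro a b h _; simpa
  | cons x xs ih =>
    intro a b h hall
    exact ih _ _ (le_min h (hall x List.mem_cons_self)) (fun y hy => hall y (List.mem_cons_of_mem x hy))

-- set of a nonempty constant list has length 1; length 1 means all equal
lemma set_ofList_const {α : Type} [BEq α] [LawfulBEq α] (a : α) :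
    ∀ (xs : List α), (∀ y ∈ xs, y = a) → PySem.Set.ofList xs = if xs = [] then [] else [a] := by
  have aux : ∀ (ys : List α), (∀ y ∈ ys, y = a) → ys.foldl PySem.Set.add [a] = [a] := by
    intro ys
    induction ys with
    | nil => intro _; rfl
    | cons z zs ihz =>
      intro hz
      have hz0 : z = a := hz z List.mem_cons_self
      subst hz0
      simp only [List.foldl_cons]
      have h1 : PySem.Set.add [z] z = [z] := by simp [PySem.Set.add, PySem.Set.contains]
      rw [h1]
      exact ihz (fun y hy => hz y (List.mem_cons_of_mem z hy))
  intro xs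
  induction xs with
  | nil => intro _; rfl
  | cons x xs _ =>
    intro hall
    have hx : x = a := hall x List.mem_cons_self
    subst hx
    show (x :: xs).foldl PySem.Set.add [] = _
    simp only [List.foldl_cons]
    have hadd : PySem.Set.add ([] : List α) x = [x] := by rfl
    rw [hadd, aux xs (fun y hy => hall y (List.mem_cons_of_mem x hy))]
    simp

lemma set_len_one_iff {α : Type} [BEq α] [LawfulBEq α] (x : α) (xs : List α) :
    (PySem.Set.ofList (x :: xs)).length = 1 ↔ ∀ y ∈ xs, y = x := by
  constructor
  · intro h y hy
    have hx : x ∈ PySem.Set.ofList (x :: xs) :=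
      (PySem.Set.mem_ofList _ _).mpr List.mem_cons_self
    have hyy : y ∈ PySem.Set.ofList (x :: xs) :=
      (PySem.Set.mem_ofList _ _).mpr (List.mem_cons_of_mem x hy)
    rcases hv : PySem.Set.ofList (x :: xs) with _ | ⟨w, ws⟩
    · rw [hv] at hx; simp at hx
    · rw [hv] at h hx hyy
      simp at h
      subst h
      simp at hx hyy
      rw [hx, hyy]
  · intro h
    have hall : ∀ y ∈ x :: xs, y = x := by
      intro y hy
      rcases List.mem_cons.mp hy with rfl | hy
      · rfl
      · exact h y hy
    rw [set_ofList_const x (x :: xs) hall]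
    simp

-- generic loop lemma: a loop 'while i < n and C i: i += 1' returns k when C holds below k
-- and fails at k (or k = n); stated for pvPLoop/pvSLoop via their shared shape
lemma pvPLoop_eq (vals : List String) (min_len k : Nat)
    (hk : k ≤ min_len)
    (htrue : ∀ j < k, pvAllEqCol vals (j : Int) = true)
    (hstop : k < min_len → pvAllEqCol vals (k : Int) = false) :
    ∀ p, p ≤ k → pvPLoop vals min_len p = k := by
  intro p hp
  induction hm : min_len - p using Nat.strong_induction_on generalizing p with
  | _ n ihn =>
  rw [pvPLoop]
  rcases Nat.lt_or_ge p k with hlt | hge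
  · rw [dif_pos ⟨by omega, htrue p hlt⟩]
    exact ihn (min_len - (p + 1)) (by omega) (p + 1) (by omega) rfl
  · have hpk : p = k := le_antisymm hp hge
    subst hpk
    rcases Nat.lt_or_ge p min_len with h1 | h1
    · have hcond : ¬ (p < min_len ∧ pvAllEqCol vals (p : Int) = true) := by
        rintro ⟨_, hc⟩
        rw [hstop h1] at hc
        exact Bool.false_ne_true hc
      rw [dif_neg hcond]
    · have hcond : ¬ (p < min_len ∧ pvAllEqCol vals (p : Int) = true) := by
        rintro ⟨hc, _⟩; omega
      rw [dif_neg hcond]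

lemma pvSLoop_eq (vals : List String) (min_len k : Nat)
    (hk : k ≤ min_len)
    (htrue : ∀ j < k, pvAllEqCol vals (-((j : Int) + 1)) = true)
    (hstop : k < min_len → pvAllEqCol vals (-((k : Int) + 1)) = false) :
    ∀ p, p ≤ k → pvSLoop vals min_len p = k := by
  intro p hp
  induction hm : min_len - p using Nat.strong_induction_on generalizing p with
  | _ n ihn =>
  rw [pvSLoop]
  rcases Nat.lt_or_ge p k with hlt | hge
  · rw [dif_pos ⟨by omega, htrue p hlt⟩]
    exact ihn (min_len - (p + 1)) (by omega) (p + 1) (by omega) rfl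
  · have hpk : p = k := le_antisymm hp hge
    subst hpk
    rcases Nat.lt_or_ge p min_len with h1 | h1
    · have hcond : ¬ (p < min_len ∧ pvAllEqCol vals (-((p : Int) + 1)) = true) := by
        rintro ⟨_, hc⟩
        rw [hstop h1] at hc
        exact Bool.false_ne_true hc
      rw [dif_neg hcond]
    · have hcond : ¬ (p < min_len ∧ pvAllEqCol vals (-((p : Int) + 1)) = true) := by
        rintro ⟨hc, _⟩; omega
      rw [dif_neg hcond]

lemma allEqCol_true_iff (v0 : String) (rest : List String) (i : Int) :
    pvAllEqCol (v0 :: rest) i = true ↔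
      ∀ v ∈ rest, PySem.Str.pyGet? v i = PySem.Str.pyGet? v0 i := by
  unfold pvAllEqCol
  rw [List.map_cons, beq_iff_eq, set_len_one_iff]
  simp

lemma prefix_getElem?_eq {F l : List Char} (h : F <+: l) {j : Nat} (hj : j < F.length) :
    l[j]? = F[j]? := by
  obtain ⟨t, rfl⟩ := h
  exact List.getElem?_append_left hj

-- v[-(j+1)] is the j-th character of the reversed string (j in range)
lemma col_neg (v : String) (j : Nat) (h : j < v.toList.length) :
    PySem.Str.pyGet? v (-((j : Int) + 1)) = v.toList.reverse[j]? := by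
  have hc : -((j : Int) + 1) = -(((j + 1 : Nat) : Int)) := by push_cast; ring
  rw [PySem.Str.pyGet?_eq, PySem.Chars.pyGet?_eq_listPyGet?, hc,
    PySem.List.pyGet?_neg_natCast v.toList (j + 1) (by omega) (by omega),
    List.getElem?_reverse (by omega),
    show v.toList.length - (j + 1) = v.toList.length - 1 - j by omega]

lemma drop_of_suffix_rev {S first : List Char} (h : S <+: first.reverse) :
    first.drop (first.length - S.length) = S.reverse := by
  obtain ⟨t, ht⟩ := h
  have hfirst : first = t.reverse ++ S.reverse := by
    rw [← List.reverse_reverse first, ← ht, List.reverse_append]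
  have hlen : first.length = S.length + t.length := by
    have h2 := congrArg List.length ht
    simp at h2
    omega
  rw [show first.length - S.length = t.reverse.length by
    rw [List.length_reverse]; omega, hfirst]
  exact List.drop_left

-- ===== VERDICT (by name: the statement is the Claim_ definition above) =====
theorem replace_variant_token_spec : Claim_equal_replace_variant_token := by
  intro vals _ hpre
  unfold Spec_replace_variant_token
  cases vals with
  | nil => exact absurd rfl hpre
  | cons v0 rest =>
    have hfold := foldl_pvCp_prefix (rest.map String.toList) v0.toList
    have hfoldR := foldl_pvCp_prefix (rest.map (fun v => v.toList.reverse)) v0.toList.reverse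
    set first := v0.toList with hfirstdef
    set F := (rest.map String.toList).foldl pvCp first with hFdef
    set S := (rest.map (fun v => v.toList.reverse)).foldl pvCp first.reverse with hSdef
    have hFpre : F <+: first := hfold.1
    have hFall : ∀ v ∈ rest, F <+: v.toList :=
      fun v hv => hfold.2 _ (List.mem_map_of_mem hv)
    have hSpre : S <+: first.reverse := hfoldR.1
    have hSall : ∀ v ∈ rest, S <+: v.toList.reverse :=
      fun v hv => hfoldR.2 _ (List.mem_map_of_mem hv)
    set min_len := (rest.map (fun v => v.toList.length)).foldl Nat.min first.length with hmldef
    have hmin := foldl_min_le (rest.map (fun v => v.toList.length)) first.length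
    have hml1 : min_len ≤ first.length := hmin.1
    have hml2 : ∀ v ∈ rest, min_len ≤ v.toList.length :=
      fun v hv => hmin.2 _ (List.mem_map_of_mem hv)
    have hkF : F.length ≤ min_len := by
      apply le_foldl_min _ _ _ hFpre.length_le
      intro x hx
      obtain ⟨v, hv, rfl⟩ := List.mem_map.mp hx
      exact (hFall v hv).length_le
    have hSfl : S.length ≤ first.length := by
      have h2 := hSpre.length_le
      rw [List.length_reverse] at h2
      exact h2
    have hSvl : ∀ v ∈ rest, S.length ≤ v.toList.length := by
      intro v hv
      have h2 := (hSall v hv).length_le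
      rw [List.length_reverse] at h2
      exact h2
    have hkS : S.length ≤ min_len := by
      apply le_foldl_min _ _ _ hSfl
      intro x hx
      obtain ⟨v, hv, rfl⟩ := List.mem_map.mp hx
      exact hSvl v hv
    -- the first while-loop computes F.length
    have hP : pvPLoop (v0 :: rest) min_len 0 = F.length := by
      apply pvPLoop_eq (v0 :: rest) min_len F.length hkF
      · intro j hj
        rw [allEqCol_true_iff]
        intro v hv
        have hjv : j < v.toList.length := lt_of_lt_of_le hj (hFall v hv).length_le
        simp only [PySem.Str.pyGet?_eq, PySem.Chars.pyGet?_eq_listPyGet?,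
          PySem.List.pyGet?_natCast]
        rw [prefix_getElem?_eq (hFall v hv) hj, prefix_getElem?_eq hFpre hj]
      · intro hlt
        cases hcol : pvAllEqCol (v0 :: rest) (F.length : Int) with
        | false => rfl
        | true =>
          exfalso
          rw [allEqCol_true_iff] at hcol
          apply foldl_pvCp_max (rest.map String.toList) first (lt_of_lt_of_le hlt hml1)
          intro d hd
          obtain ⟨v, hv, rfl⟩ := List.mem_map.mp hd
          refine ⟨lt_of_lt_of_le hlt (hml2 v hv), ?_⟩
          have := hcol v hv
          simpa only [PySem.Str.pyGet?_eq, PySem.Chars.pyGet?_eq_listPyGet?,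
            PySem.List.pyGet?_natCast] using this
      · exact Nat.zero_le _
    -- the second while-loop computes S.length
    have hQ : pvSLoop (v0 :: rest) min_len 0 = S.length := by
      apply pvSLoop_eq (v0 :: rest) min_len S.length hkS
      · intro j hj
        rw [allEqCol_true_iff]
        intro v hv
        have hjv : j < v.toList.length := lt_of_lt_of_le hj (hSvl v hv)
        have hj0 : j < first.length := lt_of_lt_of_le hj hSfl
        rw [col_neg v j hjv, col_neg v0 j hj0]
        rw [prefix_getElem?_eq (hSall v hv) hj, prefix_getElem?_eq hSpre hj]
      · intro hlt
        cases hcol : pvAllEqCol (v0 :: rest) (-((S.length : Int) + 1)) with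
        | false => rfl
        | true =>
          exfalso
          rw [allEqCol_true_iff] at hcol
          apply foldl_pvCp_max (rest.map (fun v => v.toList.reverse)) first.reverse
            (by rw [List.length_reverse]; exact lt_of_lt_of_le hlt hml1)
          intro d hd
          obtain ⟨v, hv, rfl⟩ := List.mem_map.mp hd
          refine ⟨by rw [List.length_reverse]; exact lt_of_lt_of_le hlt (hml2 v hv), ?_⟩
          have hc := hcol v hv
          rw [col_neg v S.length (lt_of_lt_of_le hlt (hml2 v hv)),
            col_neg v0 S.length (lt_of_lt_of_le hlt hml1)] at hc
          exact hc
      · exact Nat.zero_le _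
    -- A's prefix slice is F, A's suffix slice is S.reverse
    have hprefix : PySem.List.slice first none (some ((F.length : Nat) : Int)) = F := by
      rw [PySem.List.slice_to_natCast]
      exact (List.prefix_iff_eq_take.mp hFpre).symm
    have hsuffix :
        (if pvSLoop (v0 :: rest) min_len 0 ≠ 0 then
          PySem.List.slice first (some ((first.length : Int) - (pvSLoop (v0 :: rest) min_len 0 : Int))) none
        else []) = S.reverse := by
      rw [hQ]
      by_cases hs0 : S.length = 0
      · rw [if_neg (by omega)]
        rw [List.eq_nil_of_length_eq_zero hs0]
        rfl
      · rw [if_pos hs0]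
        rw [PySem.List.slice_from first (by omega)]
        rw [show ((first.length : Int) - (S.length : Int)).toNat = first.length - S.length by
          have := hSfl; omega]
        exact drop_of_suffix_rev hSpre
    -- now compute both sides
    show replace_variant_token (v0 :: rest) = replace_variant_token_alt (v0 :: rest)
    rw [replace_variant_token, replace_variant_token_alt]
    simp only [foldl_pair_split, List.foldl_map]
    rw [← hfirstdef]
    have hml' : List.foldl (fun x y => Nat.min x y.toList.length) first.length rest = min_len := by
      rw [hmldef, List.foldl_map]
    rw [hml', hP, hprefix, hsuffix]
    have hBF : rest.foldl (fun acc v => pvCp acc v.toList) first = F := by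
      rw [hFdef, List.foldl_map]
    have hBS : rest.foldl (fun acc v => pvCp acc v.toList.reverse) first.reverse = S := by
      rw [hSdef, List.foldl_map]
    rw [hBF, hBS]
    -- the X-count integers agree: len - (t + s) = len - t - s
    simp only [Nat.cast_add, sub_add_eq_sub_sub]
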